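-- pv_equiv track=rewrite | github.com/muniter/advent-of-code | 2020/06/code.py | counter_of_answers_yes
-- ===== SOURCE A (Python) =====
-- def counter_of_answers_yes(group_data):
--     """This counts the questions in a group to which everyone
--     answered yes
--
--     :group_data: List of strings
--     :returns: Unique characters
--
--     """
--     counter = 0
--     unique = set()
--     union = ''
--     for item in group_data:
--         union += item
--
--     for letter in union:
--         unique.add(letter)
--
--     for letter in unique:
--         matches = [letter in answer for answer in group_data]
--         if all(matches):
--             counter += 1
--
--     return counter
-- ===== SOURCE B (Python) =====
-- def counter_of_answers_yes(group_data):
--     if not group_data: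
--         return 0
--     common = set(group_data[0])
--     for answer in group_data[1:]:
--         common &= set(answer)
--     return len(common)
-- ===== Notes on version B (the rewrite author's own statement) =====
-- stated objective: simpler
-- what changed: B folds the groups' character sets together with set intersection (guarding the empty group with 0) instead of building a concatenated union string, deduplicating it, and testing each unique letter's membership in every answer.
import Mathlib
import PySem

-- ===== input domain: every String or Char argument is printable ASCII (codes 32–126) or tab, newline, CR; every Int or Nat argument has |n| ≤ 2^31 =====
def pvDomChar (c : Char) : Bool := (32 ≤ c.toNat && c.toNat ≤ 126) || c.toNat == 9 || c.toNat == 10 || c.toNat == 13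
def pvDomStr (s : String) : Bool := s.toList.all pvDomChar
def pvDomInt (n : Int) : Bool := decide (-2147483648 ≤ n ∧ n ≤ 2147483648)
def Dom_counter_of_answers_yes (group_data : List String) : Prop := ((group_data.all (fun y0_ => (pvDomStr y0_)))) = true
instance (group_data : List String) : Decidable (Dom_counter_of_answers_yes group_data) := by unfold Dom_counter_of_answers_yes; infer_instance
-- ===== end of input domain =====

-- B replaces A's union-then-membership-test scan by a fold of set intersections (simpler, one pass).

-- ===== PORT A =====
-- 'letter in answer' with letter a single character is exactly char membership in the string's characters.
def counter_of_answers_yes (group_data : List String) : Int :=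
  let union : List Char := group_data.foldl (fun u item => u ++ item.toList) []
  let unique : PySem.Set Char := union.foldl PySem.Set.add PySem.Set.empty
  unique.foldl
    (fun counter letter =>
      if (group_data.map (fun answer => decide (letter ∈ answer.toList))).all (fun b => b) then
        counter + 1
      else counter)
    0

-- ===== PORT B =====
def counter_of_answers_yes_alt (group_data : List String) : Int :=
  match group_data with
  | [] => 0
  | first :: rest =>
    let common : PySem.Set Char :=
      rest.foldl (fun c answer => PySem.Set.inter c (PySem.Set.ofList answer.toList))
        (PySem.Set.ofList first.toList)
    (PySem.Set.len common : Int)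

-- ===== PRECONDITION & SPEC =====
def Spec_counter_of_answers_yes (group_data : List String) (out : Int) : Prop := out = counter_of_answers_yes_alt group_data
instance (group_data : List String) (out : Int) : Decidable (Spec_counter_of_answers_yes group_data out) := by unfold Spec_counter_of_answers_yes; infer_instance

-- ===== CLAIM (what is proved, stated in full; the proofs are below) =====
def Claim_equal_counter_of_answers_yes : Prop := ∀ (group_data : List String), Dom_counter_of_answers_yes group_data → Spec_counter_of_answers_yes group_data (counter_of_answers_yes group_data)

-- ===== LEMMAS AND PROOFS =====

-- A's counting loop is countP
theorem foldl_count_eq_countP (p : Char → Bool) (l : List Char) (acc : Int) :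
    l.foldl (fun c x => if p x then c + 1 else c) acc = acc + l.countP p := by
  induction l generalizing acc with
  | nil => simp
  | cons x xs ih =>
    simp only [List.foldl_cons, List.countP_cons, ih]
    by_cases h : p x <;> simp [h] <;> omega

theorem mem_foldl_inter (rest : List String) (init : PySem.Set Char) (x : Char) :
    (x ∈ rest.foldl (fun c answer => PySem.Set.inter c (PySem.Set.ofList answer.toList)) init) ↔
      x ∈ init ∧ ∀ s ∈ rest, x ∈ s.toList := by
  induction rest generalizing init with
  | nil => simp
  | cons s rest ih =>
    simp only [List.foldl_cons, ih, PySem.Set.mem_inter, PySem.Set.mem_ofList, List.mem_cons]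
    constructor
    · rintro ⟨⟨h1, h2⟩, h3⟩
      refine ⟨h1, fun t ht => ?_⟩
      rcases ht with rfl | ht
      · exact h2
      · exact h3 t ht
    · rintro ⟨h1, h2⟩
      exact ⟨⟨h1, h2 s (Or.inl rfl)⟩, fun t ht => h2 t (Or.inr ht)⟩

theorem nodup_foldl_inter (rest : List String) (init : PySem.Set Char) (h : init.Nodup) :
    (rest.foldl (fun c answer => PySem.Set.inter c (PySem.Set.ofList answer.toList)) init).Nodup := by
  induction rest generalizing init with
  | nil => exact h
  | cons s rest ih => exact ih _ (PySem.Set.nodup_inter _ _ h)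

theorem mem_foldl_append (l : List String) (acc : List Char) (x : Char) :
    (x ∈ l.foldl (fun u item => u ++ item.toList) acc) ↔ x ∈ acc ∨ ∃ s ∈ l, x ∈ s.toList := by
  induction l generalizing acc with
  | nil => simp
  | cons s l ih =>
    simp only [List.foldl_cons, ih, List.mem_append, List.mem_cons]
    constructor
    · rintro (⟨h | h⟩ | ⟨t, ht, hx⟩)
      · exact Or.inl h
      · exact Or.inr ⟨s, Or.inl rfl, h⟩
      · exact Or.inr ⟨t, Or.inr ht, hx⟩
    · rintro (h | ⟨t, rfl | ht, hx⟩)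
      · exact Or.inl (Or.inl h)
      · exact Or.inl (Or.inr hx)
      · exact Or.inr ⟨t, ht, hx⟩

-- ===== VERDICT (by name: the statement is the Claim_ definition above) =====
theorem counter_of_answers_yes_spec : Claim_equal_counter_of_answers_yes := by
  intro group_data _
  show counter_of_answers_yes group_data = counter_of_answers_yes_alt group_data
  unfold counter_of_answers_yes counter_of_answers_yes_alt
  cases group_data with
  | nil => rfl
  | cons first rest =>
    simp only []
    set gd := first :: rest with hgd
    set union : List Char := gd.foldl (fun u item => u ++ item.toList) [] with hunion
    set p : Char → Bool := fun letter =>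
      (gd.map (fun answer => decide (letter ∈ answer.toList))).all (fun b => b) with hp
    have hfold := foldl_count_eq_countP p (union.foldl PySem.Set.add PySem.Set.empty) 0
    rw [show (union.foldl PySem.Set.add PySem.Set.empty) = PySem.Set.ofList union from
      (PySem.Set.ofList_eq_foldl union).symm] at hfold ⊢
    rw [hfold]
    set common : PySem.Set Char :=
      rest.foldl (fun c answer => PySem.Set.inter c (PySem.Set.ofList answer.toList))
        (PySem.Set.ofList first.toList) with hcommon
    rw [List.countP_eq_length_filter]
    have hperm : List.Perm ((PySem.Set.ofList union).filter p) common := by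
      rw [List.perm_ext_iff_of_nodup ((PySem.Set.nodup_ofList union).filter p)
        (nodup_foldl_inter rest _ (PySem.Set.nodup_ofList first.toList))]
      intro x
      rw [mem_foldl_inter]
      simp only [List.mem_filter, PySem.Set.mem_ofList, hunion, mem_foldl_append,
        List.not_mem_nil, false_or, hp, List.all_map, List.all_eq_true, decide_eq_true_eq,
        Function.comp, PySem.Set.mem_ofList]
      constructor
      · rintro ⟨_, h⟩
        exact ⟨h first (List.mem_cons_self ..), fun s hs => h s (List.mem_cons_of_mem _ hs)⟩
      · rintro ⟨h1, h2⟩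
        refine ⟨⟨first, List.mem_cons_self .., h1⟩, fun s hs => ?_⟩
        rcases List.mem_cons.1 hs with rfl | hs
        · exact h1
        · exact h2 s hs
    simp [PySem.Set.len, hperm.length_eq]
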